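-- pv_equiv track=rewrite | github.com/olgaobiols/sbc_cbr_i_recomanacio | operadors_transformacio_realista.py | _info_ingredients_plat
-- ===== SOURCE A (Python) =====
-- def _info_ingredients_plat(plat, base_ingredients):
--     """
--     Donat un plat amb plat['ingredients'] = ['tomàquet', 'nata', ...]
--     retorna la llista de files d'ingredients.csv corresponents.
--     """
--     index = {row["nom_ingredient"]: row for row in base_ingredients}
--     info = []
--     for nom in plat.get("ingredients", []):
--         fila = index.get(nom)
--         if fila:
--             info.append(fila)
--     return info
-- ===== SOURCE B (Python) =====
-- def _info_ingredients_plat(plat, base_ingredients):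
--     """Loop inversion: one pass over base_ingredients fills positional slots
--     for the dish's ingredient list; the filled slots are then collected in
--     order (later rows overwrite earlier ones in a slot)."""
--     noms = plat.get("ingredients", [])
--     slots = [None] * len(noms)
--     for row in base_ingredients:
--         nom = row["nom_ingredient"]
--         for i, n in enumerate(noms):
--             if n == nom:
--                 slots[i] = row
--     return [fila for fila in slots if fila]
-- ===== Notes on version B (the rewrite author's own statement) =====
-- stated objective: alternative
-- what changed: Inverts the loops: instead of indexing base_ingredients in a dict and looking up each ingredient name, B makes one pass over base_ingredients filling a positional slot array aligned with the dish's ingredient list, then collects the filled slots; Pre_ excludes inputs where a row lacks 'nom_ingredient', on which both A and B raise KeyError.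
import Mathlib
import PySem

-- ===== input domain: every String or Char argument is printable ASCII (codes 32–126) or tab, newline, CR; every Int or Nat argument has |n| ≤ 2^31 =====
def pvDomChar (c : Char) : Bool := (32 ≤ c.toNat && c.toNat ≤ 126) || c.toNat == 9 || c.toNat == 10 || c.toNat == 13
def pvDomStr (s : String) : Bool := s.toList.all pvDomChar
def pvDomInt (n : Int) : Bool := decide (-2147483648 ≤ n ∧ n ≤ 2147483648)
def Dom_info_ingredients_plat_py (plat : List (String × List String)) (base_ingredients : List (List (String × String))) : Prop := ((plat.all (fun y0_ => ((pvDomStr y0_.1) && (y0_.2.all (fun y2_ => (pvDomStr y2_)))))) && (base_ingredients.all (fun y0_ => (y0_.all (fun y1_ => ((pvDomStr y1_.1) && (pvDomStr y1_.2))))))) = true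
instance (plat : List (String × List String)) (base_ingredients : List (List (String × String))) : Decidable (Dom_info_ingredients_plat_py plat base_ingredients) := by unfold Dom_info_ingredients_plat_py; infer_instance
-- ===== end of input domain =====

-- B inverts the loops: one pass over base_ingredients fills a positional slot array aligned with
-- the dish's ingredient list (objective: alternative). Return-value equivalence only.

-- shared helper: the key value row["nom_ingredient"] (defaulted; unreached default inside Pre_)
def pvKey (row : List (String × String)) : String := (List.lookup "nom_ingredient" row).getD ""

-- ===== PORT A =====
-- row["nom_ingredient"] raises KeyError when the key is missing — Pre_ excludes exactly those
-- inputs; there the port keys by the irrelevant default "" (never reached inside Pre_).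
def info_ingredients_plat_py (plat : List (String × List String)) (base_ingredients : List (List (String × String))) : List (List (String × String)) :=
  let index : PySem.Dict String (List (String × String)) :=
    base_ingredients.foldl (fun d row => d.insert (pvKey row) row) PySem.Dict.empty
  let ings := (List.lookup "ingredients" plat).getD []
  ings.foldl (fun info nom =>
    match index.get? nom with           -- fila = index.get(nom)
    | some fila => if fila.isEmpty then info else info ++ [fila]   -- `if fila:` — None and {} are falsy
    | none => info) []

-- ===== PORT B =====
-- slots[i] starts None; each row overwrites every slot whose name equals row["nom_ingredient"]
-- (again keyed via getD "", unreached inside Pre_ where B's Python also raises KeyError).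
def info_ingredients_plat_py_alt (plat : List (String × List String)) (base_ingredients : List (List (String × String))) : List (List (String × String)) :=
  let noms := (List.lookup "ingredients" plat).getD []
  let slots := base_ingredients.foldl
      (fun slots row =>
        let nom := pvKey row
        (noms.zip slots).map (fun p => if p.1 == nom then some row else p.2))
      (noms.map (fun _ => (none : Option (List (String × String)))))
  slots.foldl (fun info fila =>
    match fila with
    | some f => if f.isEmpty then info else info ++ [f]   -- `if fila:`
    | none => info) []

-- ===== PRECONDITION & SPEC =====
-- A raises KeyError (building the index) iff some row lacks the "nom_ingredient" key; Pre_ excludes exactly that.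
def Pre_info_ingredients_plat_py (plat : List (String × List String)) (base_ingredients : List (List (String × String))) : Prop :=
  base_ingredients.all (fun row => (List.lookup "nom_ingredient" row).isSome) = true
instance (plat : List (String × List String)) (base_ingredients : List (List (String × String))) : Decidable (Pre_info_ingredients_plat_py plat base_ingredients) := by unfold Pre_info_ingredients_plat_py; infer_instance

def pvWitness_info_ingredients_plat_py : (List (String × List String)) × (List (List (String × String))) :=
  ([("ingredients", ["sal", "oli"])], [[("nom_ingredient", "sal"), ("quantitat", "1")], [("nom_ingredient", "nata")]])

def Spec_info_ingredients_plat_py (plat : List (String × List String)) (base_ingredients : List (List (String × String))) (out : List (List (String × String))) : Prop := out = info_ingredients_plat_py_alt plat base_ingredients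
instance (plat : List (String × List String)) (base_ingredients : List (List (String × String))) (out : List (List (String × String))) : Decidable (Spec_info_ingredients_plat_py plat base_ingredients out) := by unfold Spec_info_ingredients_plat_py; infer_instance

-- ===== CLAIM =====
def Claim_equal_info_ingredients_plat_py : Prop := ∀ (plat : List (String × List String)) (base_ingredients : List (List (String × String))), Dom_info_ingredients_plat_py plat base_ingredients → Pre_info_ingredients_plat_py plat base_ingredients → Spec_info_ingredients_plat_py plat base_ingredients (info_ingredients_plat_py plat base_ingredients)

-- ===== LEMMAS AND PROOFS =====

-- the last row of `base` whose key is `nom`, as a fold with general initial value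
def pvLastFrom (nom : String) (base : List (List (String × String))) (init : Option (List (String × String))) : Option (List (String × String)) :=
  base.foldl (fun fila row => if pvKey row == nom then some row else fila) init

-- A's dict lookup is the last-match fold
lemma get?_fold_insert (nom : String) (base : List (List (String × String))) :
    ∀ d : PySem.Dict String (List (String × String)),
    (base.foldl (fun d row => d.insert (pvKey row) row) d).get? nom
      = pvLastFrom nom base (d.get? nom) := by
  induction base with
  | nil => intro d; rfl
  | cons row rest ih =>
    intro d
    simp only [List.foldl_cons, pvLastFrom] at *
    rw [ih, PySem.Dict.get?_insert]
    congr 1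
    by_cases h : pvKey row = nom <;> simp [h, eq_comm (a := nom)]

lemma zip_self_map {α β : Type} (l : List α) (f : α → β) :
    l.zip (l.map f) = l.map (fun a => (a, f a)) := by
  induction l with
  | nil => rfl
  | cons a t ih => simp [ih]

-- B's slot-filling pass computes the last-match fold positionally
lemma slots_fold (base : List (List (String × String))) (noms : List String) :
    ∀ f : String → Option (List (String × String)),
    base.foldl
      (fun slots row => (noms.zip slots).map (fun p => if p.1 == pvKey row then some row else p.2))
      (noms.map f)
      = noms.map (fun n => pvLastFrom n base (f n)) := by
  induction base with
  | nil => intro f; simp [pvLastFrom]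
  | cons row rest ih =>
    intro f
    simp only [List.foldl_cons]
    rw [zip_self_map noms f, List.map_map]
    have hc : ((fun p : String × Option (List (String × String)) => if p.1 == pvKey row then some row else p.2) ∘ fun n => (n, f n))
        = fun n => if n == pvKey row then some row else f n := rfl
    rw [hc, ih (fun n => if n == pvKey row then some row else f n)]
    apply List.map_congr_left
    intro n _
    simp only [pvLastFrom, List.foldl_cons]
    congr 1
    by_cases h : pvKey row = n <;> simp [h, eq_comm (a := n)]

theorem info_ingredients_plat_py_spec : Claim_equal_info_ingredients_plat_py := by
  intro plat base _hDom _hPre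
  unfold Spec_info_ingredients_plat_py info_ingredients_plat_py info_ingredients_plat_py_alt
  simp only []
  rw [slots_fold base ((List.lookup "ingredients" plat).getD []) (fun _ => none), List.foldl_map]
  congr 1
  funext info nom
  rw [get?_fold_insert nom base PySem.Dict.empty]
  rfl
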